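-- pv_equiv track=rewrite | github.com/KvanQuilst/AdventOfCode | 23/day13/day13.py | v_symmetry
-- ===== SOURCE A (Python) =====
-- def v_symmetry(pattern):
--     sum = 0
--     for i, l in enumerate(pattern[0][1:-1], 1):
--         sym = True
--         for j in range(0, i):
--             if i + j >= len(pattern[0])-1 or i-j-1 < 0:
--                 break
--
--             if [x[i+j] for x in pattern] != [x[i-j-1] for x in pattern]:
--                 sym = False
--                 break
--
--         if sym:
--             sum += i
--
--     return sum
-- ===== SOURCE B (Python) =====
-- def v_symmetry(pattern):
--     n = len(pattern[0])
--     candidates = set(range(1, n - 1))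
--     for row in pattern:
--         candidates = {i for i in candidates
--                       if all(row[i + j] == row[i - j - 1]
--                              for j in range(min(i, n - 1 - i)))}
--     return sum(candidates)
-- ===== Notes on version B (the rewrite author's own statement) =====
-- stated objective: alternative
-- what changed: Swapped the loop nest: instead of A's per-axis scan that rebuilds full column lists for every offset, B iterates rows outermost and intersects a shrinking candidate set of reflection axes, summing the survivors.
import Mathlib
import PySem

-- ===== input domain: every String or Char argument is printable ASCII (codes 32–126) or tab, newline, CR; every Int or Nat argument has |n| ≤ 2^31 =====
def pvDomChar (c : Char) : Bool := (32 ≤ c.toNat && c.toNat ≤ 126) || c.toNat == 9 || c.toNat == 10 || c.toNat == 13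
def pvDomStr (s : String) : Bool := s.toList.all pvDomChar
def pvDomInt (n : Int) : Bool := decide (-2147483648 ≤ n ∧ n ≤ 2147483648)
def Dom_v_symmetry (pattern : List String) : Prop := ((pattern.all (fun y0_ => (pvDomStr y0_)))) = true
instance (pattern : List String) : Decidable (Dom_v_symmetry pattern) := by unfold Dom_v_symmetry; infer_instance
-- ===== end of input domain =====

-- B re-implements A with the loop nest swapped (rows outer, axes inner), maintaining a shrinking
-- candidate set of reflection axes; same values on Pre_, objective: alternative decomposition.

-- ===== PORT A =====
-- `[x[k] for x in pattern]`; `getD … ' '` is exact under Pre_ (every index used is in range).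
def vsymCol (rows : List (List Char)) (k : Nat) : List Char :=
  rows.map (fun x => x.getD k ' ')

-- the inner `for j in range(0, i)` loop with its two breaks (js is the remaining range).
def vsymGo (rows : List (List Char)) (n : Int) (i : Nat) : List Nat → Bool
  | [] => true
  | j :: js =>
    if (i : Int) + (j : Int) ≥ n - 1 ∨ (i : Int) - (j : Int) - 1 < 0 then true
    else if vsymCol rows (i + j) ≠ vsymCol rows (i - j - 1) then false
    else vsymGo rows n i js

def v_symmetry (pattern : List String) : Int :=
  let rows := pattern.map String.toList
  let row0 := rows.headD []
  -- for i, l in enumerate(pattern[0][1:-1], 1):  (the character l is unused; i = index + 1)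
  let sliced := PySem.List.slice row0 (some 1) (some (-1))
  (List.range sliced.length).foldl
    (fun sum k =>
      let i := k + 1
      if vsymGo rows (row0.length : Int) i (List.range i) then sum + (i : Int) else sum) 0

-- ===== PORT B =====
-- all(row[i+j] == row[i-j-1] for j in range(min(i, n-1-i)))
def vsymRowOK (n : Nat) (row : List Char) (i : Nat) : Bool :=
  (List.range (min i (n - 1 - i))).all
    (fun j => row.getD (i + j) ' ' == row.getD (i - j - 1) ' ')

-- Python B keeps a set of small ints born from range(1, n-1); summing it is order-independent,
-- so it is ported as the ascending candidate list.
def v_symmetry_alt (pattern : List String) : Int :=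
  let rows := pattern.map String.toList
  let n := (rows.headD []).length
  let final := rows.foldl (fun cands row => cands.filter (vsymRowOK n row)) (List.range' 1 (n - 2))
  final.foldl (fun (s : Int) (i : Nat) => s + (i : Int)) 0

-- ===== PRECONDITION & SPEC =====
-- Python A raises IndexError on an empty pattern (indexing its first row) and, when the first row has ≥ 3 characters,
-- whenever some row is shorter than len(pattern[0]) - 1 (columns 0..n-2 are all indexed);
-- those inputs are exactly what Pre_ excludes.
def Pre_v_symmetry (pattern : List String) : Prop :=
  pattern ≠ [] ∧
    ((pattern.headD "").toList.length ≤ 2 ∨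
      ∀ s ∈ pattern, (pattern.headD "").toList.length - 1 ≤ s.toList.length)
instance (pattern : List String) : Decidable (Pre_v_symmetry pattern) := by
  unfold Pre_v_symmetry; infer_instance

def pvWitness_v_symmetry : List String := ["#.##.", "#.##.", "..##."]

def Spec_v_symmetry (pattern : List String) (out : Int) : Prop := out = v_symmetry_alt pattern
instance (pattern : List String) (out : Int) : Decidable (Spec_v_symmetry pattern out) := by unfold Spec_v_symmetry; infer_instance

-- ===== CLAIM (what is proved, stated in full; the proofs are below) =====
def Claim_equal_v_symmetry : Prop := ∀ (pattern : List String), Dom_v_symmetry pattern → Pre_v_symmetry pattern → Spec_v_symmetry pattern (v_symmetry pattern)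

-- ===== LEMMAS AND PROOFS =====

-- the chained filters of B's fold collapse into one filter by the conjunction over all rows
theorem vsym_foldl_filter {α β : Type} (p : β → α → Bool) :
    ∀ (rows : List β) (init : List α),
      rows.foldl (fun c r => c.filter (p r)) init
        = init.filter (fun i => rows.all (fun r => p r i)) := by
  intro rows
  induction rows with
  | nil => intro init; simp
  | cons r rs ih =>
    intro init
    simp only [List.foldl_cons, ih, List.filter_filter, List.all_cons]
    exact List.filter_congr (fun a _ => Bool.and_comm _ _)

-- summing a filtered list = fold with a guard
theorem vsym_foldl_sum_filter (q : Nat → Bool) :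
    ∀ (l : List Nat) (s : Int),
      ((l.filter q).foldl (fun (s : Int) (i : Nat) => s + (i : Int)) s)
        = l.foldl (fun (s : Int) (i : Nat) => if q i then s + (i : Int) else s) s := by
  intro l
  induction l with
  | nil => intro s; rfl
  | cons x xs ih =>
    intro s
    by_cases h : q x = true <;> simp [h, ih]

-- the inner loop of A on a strictly increasing list of j's below i is an `all`
theorem vsymGo_eq_all (rows : List (List Char)) (n : Int) (i : Nat) :
    ∀ js : List Nat, js.Pairwise (· < ·) → (∀ j ∈ js, j < i) →
      vsymGo rows n i js
        = js.all (fun j => decide (n - 1 ≤ (i : Int) + (j : Int))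
            || (vsymCol rows (i + j) == vsymCol rows (i - j - 1))) := by
  intro js
  induction js with
  | nil => intro _ _; rfl
  | cons j js ih =>
    intro hp hlt
    have hji : j < i := hlt j (by simp)
    have hneg : ¬ ((i : Int) - (j : Int) - 1 < 0) := by omega
    simp only [List.pairwise_cons] at hp
    by_cases hb : (i : Int) + (j : Int) ≥ n - 1
    · -- break: every later j' > j also satisfies the break condition
      have : vsymGo rows n i (j :: js) = true := by
        simp [vsymGo, hb]
      rw [this]
      symm
      simp only [List.all_cons, Bool.and_eq_true, List.all_eq_true]
      constructor
      · simp [ge_iff_le] at hb ⊢; omega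
      · intro j' hj'
        have : j < j' := hp.1 j' hj'
        simp only [Bool.or_eq_true, decide_eq_true_eq]
        left; omega
    · by_cases hc : vsymCol rows (i + j) = vsymCol rows (i - j - 1)
      · have := ih hp.2 (fun x hx => hlt x (by simp [hx]))
        simp [vsymGo, hb, hneg, hc, this]
      · simp [vsymGo, hb, hneg, hc]
        intro hx
        exact (hb (by omega : (i : Int) + (j : Int) ≥ n - 1)).elim

-- per-axis: A's inner-loop verdict = B's all-rows check, for 1 ≤ i ≤ n-2
theorem vsym_axis_eq (rows : List (List Char)) (n i : Nat)
    (_h1 : 1 ≤ i) (h2 : i + 2 ≤ n) :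
    vsymGo rows (n : Int) i (List.range i)
      = rows.all (fun r => vsymRowOK n r i) := by
  rw [vsymGo_eq_all rows (n : Int) i (List.range i)
      (List.pairwise_lt_range) (by intro j hj; exact List.mem_range.mp hj)]
  rw [Bool.eq_iff_iff]
  simp only [List.all_eq_true, List.mem_range, Bool.or_eq_true, decide_eq_true_eq,
    beq_iff_eq, vsymRowOK, vsymCol, List.map_inj_left]
  constructor
  · intro h r hr j hj
    have hji : j < i := lt_of_lt_of_le hj (by omega)
    rcases h j hji with hge | heq
    · exfalso; omega
    · exact heq r hr
  · intro h j hj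
    by_cases hb : (n : Int) - 1 ≤ (i : Int) + (j : Int)
    · left; exact hb
    · right
      intro r hr
      exact h r hr j (by omega)

theorem v_symmetry_eq (pattern : List String) :
    v_symmetry pattern = v_symmetry_alt pattern := by
  simp only [v_symmetry, v_symmetry_alt]
  set rows := pattern.map String.toList with hrows
  set row0 := rows.headD [] with hrow0
  set n := row0.length with hn
  have hslen : (PySem.List.slice row0 (some 1) (some (-1))).length = n - 2 := by
    rw [PySem.List.length_slice]
    rw [PySem.List.clampIdx_neg_one]
    have : PySem.List.clampIdx row0.length (1 : Int) = min 1 row0.length := by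
      exact_mod_cast PySem.List.clampIdx_natCast row0.length 1
    rw [this]
    omega
  rw [hslen]
  rw [vsym_foldl_filter, vsym_foldl_sum_filter]
  rw [List.range'_eq_map_range, List.foldl_map]
  apply PySem.List.foldl_congr_mem
  intro s k hk
  have hk' : k < n - 2 := List.mem_range.mp hk
  have hax := vsym_axis_eq rows n (k + 1) (by omega) (by omega)
  simp only [Nat.add_comm 1 k] at *
  rw [hax]

-- ===== VERDICT (by name: the statement is the Claim_ definition above) =====
theorem v_symmetry_spec : Claim_equal_v_symmetry := by
  intro pattern _ _
  unfold Spec_v_symmetry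
  exact v_symmetry_eq pattern
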